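-- pv_equiv track=rewrite | github.com/iandioch/solutions | kattis/amultiplicationgame/solution.py | winnable
-- ===== SOURCE A (Python) =====
-- def winnable(n):
--     stan = True
--     p = 1
--     while p < n:
--         if stan:
--             p *= 9
--         else:
--             p *= 2
--         stan = not stan
--     return not stan
-- ===== SOURCE B (Python) =====
-- def winnable(n):
--     power = 1
--     while power < n:
--         if n <= 9 * power:
--             return True
--         power *= 18
--     return False
-- ===== Notes on version B (the rewrite author's own statement) =====
-- stated objective: simpler
-- what changed: Replaces the alternating multiply-by-nine/multiply-by-two simulation with a turn flag by a single threshold scan over powers of eighteen with an early-return range check.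
import Mathlib
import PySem

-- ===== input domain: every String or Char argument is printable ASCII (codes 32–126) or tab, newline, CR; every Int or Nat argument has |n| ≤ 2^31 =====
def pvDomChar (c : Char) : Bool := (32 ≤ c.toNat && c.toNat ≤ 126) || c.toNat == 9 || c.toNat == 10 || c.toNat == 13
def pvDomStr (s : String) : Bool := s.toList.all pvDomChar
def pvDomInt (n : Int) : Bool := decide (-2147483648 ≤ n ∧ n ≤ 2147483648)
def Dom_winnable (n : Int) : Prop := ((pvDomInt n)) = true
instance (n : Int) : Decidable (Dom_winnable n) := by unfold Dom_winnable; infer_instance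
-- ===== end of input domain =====

-- B replaces A's alternating *9/*2 turn-flag simulation by a single powers-of-18 scan
-- with a range check; equivalence of the return values is proved for all Int inputs.

-- ===== PORT A =====
-- A's while loop: state (p, stan); the proof argument 0 < p only justifies termination.
def winnableLoop (n p : Int) (hp : 0 < p) (stan : Bool) : Bool :=
  if p < n then
    winnableLoop n (if stan then p * 9 else p * 2)
      (by split <;> omega) (!stan)
  else !stan
termination_by (n - p).toNat
decreasing_by split <;> omega

def winnable (n : Int) : Bool := winnableLoop n 1 (by norm_num) true

-- ===== PORT B =====
def winnableAltLoop (n power : Int) (hp : 0 < power) : Bool :=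
  if power < n then
    if n ≤ 9 * power then true
    else winnableAltLoop n (power * 18) (by omega)
  else false
termination_by (n - power).toNat
decreasing_by omega

def winnable_alt (n : Int) : Bool := winnableAltLoop n 1 (by norm_num)

-- ===== PRECONDITION & SPEC =====
def Spec_winnable (n : Int) (out : Bool) : Prop := out = winnable_alt n
instance (n : Int) (out : Bool) : Decidable (Spec_winnable n out) := by unfold Spec_winnable; infer_instance

-- ===== CLAIM (what is proved, stated in full; the proofs are below) =====
def Claim_equal_winnable : Prop := ∀ (n : Int), Dom_winnable n → Spec_winnable n (winnable n)

-- ===== LEMMAS AND PROOFS =====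

-- Two iterations of A's loop (starting with stan = true) equal one iteration of B's loop.
theorem key (n : Int) : ∀ (k : Nat) (p : Int) (hp : 0 < p), (n - p).toNat ≤ k →
    winnableLoop n p hp true = winnableAltLoop n p hp := by
  intro k
  induction k with
  | zero =>
    intro p hp hk
    have hnp : ¬ p < n := by omega
    rw [winnableLoop, winnableAltLoop]
    simp [hnp]
  | succ k ih =>
    intro p hp hk
    by_cases h1 : p < n
    · rw [winnableLoop, winnableAltLoop]
      simp only [h1, if_pos]
      by_cases h2 : p * 9 < n
      · have h2' : ¬ n ≤ 9 * p := by omega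
        rw [winnableLoop]
        simp only [h2, if_pos, h2', Bool.not_true, Bool.not_false, Bool.false_eq_true, if_false]
        have : winnableLoop n (p * 9 * 2) (by omega) true
            = winnableAltLoop n (p * 9 * 2) (by omega) := ih (p * 9 * 2) (by omega) (by omega)
        rw [this]
        congr 1
        omega
      · have h2' : n ≤ 9 * p := by omega
        rw [winnableLoop]
        simp [h2, h2']
    · rw [winnableLoop, winnableAltLoop]
      simp [h1]

-- ===== VERDICT (by name: the statement is the Claim_ definition above) =====
theorem winnable_spec : Claim_equal_winnable := by
  intro n _
  unfold Spec_winnable winnable winnable_alt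
  exact key n (n - 1).toNat 1 (by norm_num) (le_refl _)
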